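-- pv_equiv track=rewrite | github.com/mmfox/advent-of-code-2023 | 1/solution.py | get_text_match
-- ===== SOURCE A (Python) =====
-- def get_text_match(line):
--     conversion_map = {
--         1: "one",
--         2: "two",
--         3: "three",
--         4: "four",
--         5: "five",
--         6: "six",
--         7: "seven",
--         8: "eight",
--         9: "nine",
--     }
--     earliest_match_index = None
--     earliest_match = None
--     latest_match_index = None
--     latest_match = None
--
--     for digit, d_text in conversion_map.items():
--         earliest_find = line.find(d_text)
--         latest_find = line.rfind(d_text)
--         if (
--             earliest_match is None or earliest_find < earliest_match_index
--         ) and earliest_find != -1: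
--             earliest_match = digit
--             earliest_match_index = earliest_find
--         if (
--             latest_match is None or latest_find > latest_match_index
--         ) and latest_find != -1:
--             latest_match = digit
--             latest_match_index = latest_find
--     return earliest_match, earliest_match_index, latest_match, latest_match_index
-- ===== SOURCE B (Python) =====
-- def get_text_match(line):
--     words = [("one", 1), ("two", 2), ("three", 3), ("four", 4), ("five", 5),
--              ("six", 6), ("seven", 7), ("eight", 8), ("nine", 9)]
--     earliest_match = None
--     earliest_match_index = None
--     latest_match = None
--     latest_match_index = None
--     for i in range(len(line)):
--         for word, digit in words:
--             if line.startswith(word, i):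
--                 if earliest_match is None:
--                     earliest_match = digit
--                     earliest_match_index = i
--                 latest_match = digit
--                 latest_match_index = i
--     return earliest_match, earliest_match_index, latest_match, latest_match_index
-- ===== Notes on version B (the rewrite author's own statement) =====
-- stated objective: alternative
-- what changed: Replaces the per-word find/rfind loop with a single left-to-right index scan that checks each spelled word with startswith at every position, recording the first match once and overwriting the last match.
import Mathlib
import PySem

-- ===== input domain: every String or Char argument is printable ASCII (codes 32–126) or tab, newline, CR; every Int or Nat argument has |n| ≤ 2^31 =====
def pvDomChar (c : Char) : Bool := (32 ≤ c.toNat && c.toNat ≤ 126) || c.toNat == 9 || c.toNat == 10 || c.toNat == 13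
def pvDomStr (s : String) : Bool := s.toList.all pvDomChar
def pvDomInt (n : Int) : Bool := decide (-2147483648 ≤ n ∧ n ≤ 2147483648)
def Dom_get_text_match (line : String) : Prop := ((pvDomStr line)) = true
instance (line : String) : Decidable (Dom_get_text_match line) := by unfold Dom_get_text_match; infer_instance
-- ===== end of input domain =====

-- B replaces A's per-word find/rfind loop with a single left-to-right index scan using
-- startswith (first match recorded once, last match overwritten); same return value, no speed claim.

-- ===== PORT A =====
-- the conversion_map items, in dict insertion order
def pvWordsA : List (Int × List Char) :=
  [(1, ['o','n','e']), (2, ['t','w','o']), (3, ['t','h','r','e','e']),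
   (4, ['f','o','u','r']), (5, ['f','i','v','e']), (6, ['s','i','x']),
   (7, ['s','e','v','e','n']), (8, ['e','i','g','h','t']), (9, ['n','i','n','e'])]

-- one iteration of A's `for digit, d_text in conversion_map.items()` loop
-- (the `match emi/lmi with | none => false` arm mirrors Python's short-circuit `or`:
--  when earliest_match is not None the index is always set, so that arm is never reached)
def pvStepA (cs : List Char)
    (st : Option Int × Option Int × Option Int × Option Int)
    (p : Int × List Char) : Option Int × Option Int × Option Int × Option Int :=
  let em := st.1; let emi := st.2.1; let lm := st.2.2.1; let lmi := st.2.2.2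
  let ef := PySem.Chars.find cs p.2
  let lf := PySem.Chars.rfind cs p.2
  let e' : Option Int × Option Int :=
    if ((em.isNone || (match emi with | some v => decide (ef < v) | none => false))
        && decide (ef ≠ -1)) then (some p.1, some ef) else (em, emi)
  let l' : Option Int × Option Int :=
    if ((lm.isNone || (match lmi with | some v => decide (lf > v) | none => false))
        && decide (lf ≠ -1)) then (some p.1, some lf) else (lm, lmi)
  (e'.1, e'.2, l'.1, l'.2)

def get_text_match (line : String) : Option Int × Option Int × Option Int × Option Int :=
  pvWordsA.foldl (pvStepA line.toList) (none, none, none, none)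

-- ===== PORT B =====
def pvWordsB : List (List Char × Int) :=
  [(['o','n','e'], 1), (['t','w','o'], 2), (['t','h','r','e','e'], 3),
   (['f','o','u','r'], 4), (['f','i','v','e'], 5), (['s','i','x'], 6),
   (['s','e','v','e','n'], 7), (['e','i','g','h','t'], 8), (['n','i','n','e'], 9)]

-- body of B's inner `for word, digit in words` loop at index i
-- (`line.startswith(word, i)` for 0 ≤ i is exactly `startswith` on the suffix from i)
def pvInnerB (cs : List Char) (i : Int)
    (st : Option Int × Option Int × Option Int × Option Int)
    (p : List Char × Int) : Option Int × Option Int × Option Int × Option Int :=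
  if PySem.Chars.startswith (cs.drop i.toNat) p.1 then
    let e' : Option Int × Option Int :=
      if st.1.isNone then (some p.2, some i) else (st.1, st.2.1)
    (e'.1, e'.2, some p.2, some i)
  else st

def get_text_match_alt (line : String) : Option Int × Option Int × Option Int × Option Int :=
  (PySem.List.pyRange 0 (PySem.Str.len line) 1).foldl
    (fun st i => pvWordsB.foldl (pvInnerB line.toList i) st) (none, none, none, none)

-- ===== PRECONDITION & SPEC =====
def Spec_get_text_match (line : String) (out : Option Int × Option Int × Option Int × Option Int) : Prop := out = get_text_match_alt line
instance (line : String) (out : Option Int × Option Int × Option Int × Option Int) : Decidable (Spec_get_text_match line out) := by unfold Spec_get_text_match; infer_instance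

-- ===== CLAIM (what is proved, stated in full; the proofs are below) =====
def Claim_equal_get_text_match : Prop := ∀ (line : String), Dom_get_text_match line → Spec_get_text_match line (get_text_match line)

-- ===== LEMMAS AND PROOFS =====

-- the first word of pvWordsB matching at position j, as its digit
def pvMatchD (cs : List Char) (j : Nat) : Option Int :=
  (pvWordsB.find? (fun p => PySem.Chars.startswith (cs.drop j) p.1)).map (fun p => p.2)

-- all matches (digit, index), in index order
def pvML (cs : List Char) (k : Nat) : List (Int × Int) :=
  (List.range k).filterMap (fun j => (pvMatchD cs j).map (fun d => (d, (j : Int))))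

-- the canonical output read off the match list
def pvOut (l : List (Int × Int)) : Option Int × Option Int × Option Int × Option Int :=
  (l.head?.map (fun x => x.1), l.head?.map (fun x => x.2),
   l.getLast?.map (fun x => x.1), l.getLast?.map (fun x => x.2))

-- rfind.go searches downward from k: it returns the greatest index ≤ k where sub occurs, else -1
theorem pvRfindGo_spec (s sub : List Char) (k : Nat) :
    (PySem.Chars.rfind.go s sub k = -1 ∧ ∀ j ≤ k, ¬ sub <+: s.drop j) ∨
    (∃ m : Nat, m ≤ k ∧ PySem.Chars.rfind.go s sub k = (m : Int) ∧ sub <+: s.drop m ∧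
      ∀ j ≤ k, m < j → ¬ sub <+: s.drop j) := by
  induction k with
  | zero =>
    by_cases h : sub.isPrefixOf s
    · right
      refine ⟨0, le_refl 0, by simp [PySem.Chars.rfind.go, h], ?_, by omega⟩
      simpa [List.isPrefixOf_iff_prefix] using h
    · left
      refine ⟨by simp [PySem.Chars.rfind.go, h], ?_⟩
      intro j hj
      interval_cases j
      simpa [List.isPrefixOf_iff_prefix] using h
  | succ k ih =>
    by_cases h : sub.isPrefixOf (s.drop (k+1))
    · right
      refine ⟨k+1, le_refl _, by simp [PySem.Chars.rfind.go, h], ?_, by omega⟩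
      simpa [List.isPrefixOf_iff_prefix] using h
    · have hstep : PySem.Chars.rfind.go s sub (k+1) = PySem.Chars.rfind.go s sub k := by
        simp [PySem.Chars.rfind.go, h]
      rcases ih with ⟨h1, h2⟩ | ⟨m, hm, he, hp, hmax⟩
      · left
        refine ⟨hstep.trans h1, ?_⟩
        intro j hj
        rcases Nat.lt_or_ge j (k+1) with hj' | hj'
        · exact h2 j (by omega)
        · have hje : j = k+1 := by omega
          subst hje
          simpa [List.isPrefixOf_iff_prefix] using h
      · right
        refine ⟨m, by omega, hstep.trans he, hp, ?_⟩
        intro j hj hlt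
        rcases Nat.lt_or_ge j (k+1) with hj' | hj'
        · exact hmax j (by omega) hlt
        · have hje : j = k+1 := by omega
          subst hje
          simpa [List.isPrefixOf_iff_prefix] using h

-- an occurrence of digit d's spelled word at position j
def pvOcc (cs : List Char) (j : Nat) (d : Int) : Prop := ∃ w, (d, w) ∈ pvWordsA ∧ w <+: cs.drop j

theorem pv_words_ab (p : Int × List Char) (h : p ∈ pvWordsA) : (p.2, p.1) ∈ pvWordsB := by
  fin_cases h <;> decide

theorem pv_words_ba (p : List Char × Int) (h : p ∈ pvWordsB) : (p.2, p.1) ∈ pvWordsA := by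
  fin_cases h <;> decide

theorem pv_words_nonempty (p : Int × List Char) (h : p ∈ pvWordsA) : p.2 ≠ [] := by
  fin_cases h <;> decide

-- no spelled word is a prefix of another, so two words matching at the same position coincide
theorem pv_words_prefix_unique (p q : Int × List Char) (hp : p ∈ pvWordsA) (hq : q ∈ pvWordsA)
    (h : p.2 <+: q.2) : p = q := by
  fin_cases hp <;> fin_cases hq <;> first | rfl | (exfalso; revert h; decide)

theorem pvOcc_unique {t : List Char} {d d' : Int} {w w' : List Char}
    (hm : (d, w) ∈ pvWordsA) (hm' : (d', w') ∈ pvWordsA)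
    (h : w <+: t) (h' : w' <+: t) : d = d' ∧ w = w' := by
  rcases List.prefix_or_prefix_of_prefix h h' with hh | hh
  · have := pv_words_prefix_unique (d, w) (d', w') hm hm' hh
    exact ⟨congrArg Prod.fst this, congrArg Prod.snd this⟩
  · have := pv_words_prefix_unique (d', w') (d, w) hm' hm hh
    exact ⟨(congrArg Prod.fst this).symm, (congrArg Prod.snd this).symm⟩

theorem pvOcc_lt_length {cs : List Char} {j : Nat} {w : List Char}
    (hw : w ≠ []) (h : w <+: cs.drop j) : j < cs.length := by
  by_contra hj
  have hd : cs.drop j = [] := List.drop_eq_nil_of_le (by omega)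
  rw [hd] at h
  exact hw (List.prefix_nil.mp h)

theorem pvMatchD_eq_some_iff {cs : List Char} {j : Nat} {d : Int} :
    pvMatchD cs j = some d ↔ pvOcc cs j d := by
  constructor
  · intro h
    unfold pvMatchD at h
    rcases Option.map_eq_some_iff.mp h with ⟨p, hfind, hd⟩
    have hmem := List.mem_of_find?_eq_some hfind
    have hpred := List.find?_some hfind
    have hpre : p.1 <+: cs.drop j := (PySem.Chars.startswith_iff _ _).mp hpred
    exact ⟨p.1, hd ▸ pv_words_ba p hmem, hpre⟩
  · rintro ⟨w, hmem, hpre⟩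
    have hb := pv_words_ab (d, w) hmem
    have hsome : (pvWordsB.find? (fun p => PySem.Chars.startswith (cs.drop j) p.1)).isSome := by
      rw [List.find?_isSome]
      exact ⟨(w, d), hb, (PySem.Chars.startswith_iff _ _).mpr hpre⟩
    obtain ⟨p, hp⟩ := Option.isSome_iff_exists.mp hsome
    have hmemp := List.mem_of_find?_eq_some hp
    have hpredp := List.find?_some hp
    have hpre' : p.1 <+: cs.drop j := (PySem.Chars.startswith_iff _ _).mp hpredp
    have huniq := pvOcc_unique (pv_words_ba p hmemp) hmem hpre' hpre
    unfold pvMatchD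
    rw [hp]
    simp [huniq.1]

theorem pvMatchD_eq_none_iff {cs : List Char} {j : Nat} :
    pvMatchD cs j = none ↔ ∀ d : Int, ¬ pvOcc cs j d := by
  unfold pvMatchD
  rw [Option.map_eq_none_iff, List.find?_eq_none]
  constructor
  · rintro h d ⟨w, hmem, hpre⟩
    exact h (w, d) (pv_words_ab (d, w) hmem) ((PySem.Chars.startswith_iff _ _).mpr hpre)
  · intro h p hp hpred
    exact h p.2 ⟨p.1, pv_words_ba p hp, (PySem.Chars.startswith_iff _ _).mp hpred⟩

theorem mem_pvML {cs : List Char} {k : Nat} {x : Int × Int} :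
    x ∈ pvML cs k ↔ ∃ j : Nat, j < k ∧ x.2 = (j : Int) ∧ pvMatchD cs j = some x.1 := by
  unfold pvML
  rw [List.mem_filterMap]
  constructor
  · rintro ⟨j, hj, hx⟩
    rcases Option.map_eq_some_iff.mp hx with ⟨d, hd, hdx⟩
    exact ⟨j, List.mem_range.mp hj, by rw [← hdx], by rw [← hdx]; exact hd⟩
  · rintro ⟨j, hj, hx2, hm⟩
    refine ⟨j, List.mem_range.mpr hj, ?_⟩
    rw [hm]
    simp
    exact Prod.ext rfl hx2.symm

theorem pvML_pairwise (cs : List Char) (k : Nat) :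
    (pvML cs k).Pairwise (fun a b : Int × Int => a.2 < b.2) := by
  unfold pvML
  rw [List.pairwise_filterMap]
  apply List.Pairwise.imp ?_ (List.pairwise_lt_range)
  intro a a' hlt b hb b' hb'
  rcases Option.map_eq_some_iff.mp hb with ⟨d, _, hd⟩
  rcases Option.map_eq_some_iff.mp hb' with ⟨d', _, hd'⟩
  rw [← hd, ← hd']
  show (a : Int) < (a' : Int)
  exact_mod_cast hlt

theorem pv_head?_eq {l : List (Int × Int)} {x : Int × Int}
    (hp : l.Pairwise (fun a b : Int × Int => a.2 < b.2))
    (hx : x ∈ l) (hmin : ∀ y ∈ l, x.2 ≤ y.2) : l.head? = some x := by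
  cases l with
  | nil => cases hx
  | cons a t =>
    rcases List.mem_cons.mp hx with rfl | hx'
    · rfl
    · exfalso
      have h1 := (List.pairwise_cons.mp hp).1 x hx'
      have h2 := hmin a (List.mem_cons_self)
      omega

theorem pv_head?_eq_rev {l : List (Int × Int)} {x : Int × Int}
    (hp : l.Pairwise (fun a b : Int × Int => b.2 < a.2))
    (hx : x ∈ l) (hmax : ∀ y ∈ l, y.2 ≤ x.2) : l.head? = some x := by
  cases l with
  | nil => cases hx
  | cons a t =>
    rcases List.mem_cons.mp hx with rfl | hx'
    · rfl
    · exfalso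
      have h1 := (List.pairwise_cons.mp hp).1 x hx'
      have h2 := hmax a (List.mem_cons_self)
      omega

theorem pv_getLast?_eq {l : List (Int × Int)} {x : Int × Int}
    (hp : l.Pairwise (fun a b : Int × Int => a.2 < b.2))
    (hx : x ∈ l) (hmax : ∀ y ∈ l, y.2 ≤ x.2) : l.getLast? = some x := by
  rw [List.getLast?_eq_head?_reverse]
  apply pv_head?_eq_rev
  · rw [List.pairwise_reverse]
    exact hp
  · exact List.mem_reverse.mpr hx
  · intro y hy
    exact hmax y (List.mem_reverse.mp hy)

-- ---------- B characterization ----------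

theorem pvInnerB_no_match (cs : List Char) (i : Int) (L : List (List Char × Int))
    (st : Option Int × Option Int × Option Int × Option Int)
    (h : ∀ p ∈ L, PySem.Chars.startswith (cs.drop i.toNat) p.1 = false) :
    L.foldl (pvInnerB cs i) st = st := by
  induction L generalizing st with
  | nil => rfl
  | cons a t ih =>
    rw [List.foldl_cons]
    rw [show pvInnerB cs i st a = st from by simp [pvInnerB, h a List.mem_cons_self]]
    exact ih st (fun p hp => h p (List.mem_cons_of_mem _ hp))

-- the effect of one full inner pass when exactly the word with digit d matches at j
def pvUpd (st : Option Int × Option Int × Option Int × Option Int) (d i : Int) :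
    Option Int × Option Int × Option Int × Option Int :=
  if st.1.isNone then (some d, some i, some d, some i) else (st.1, st.2.1, some d, some i)

theorem pvInnerB_match (cs : List Char) (j : Nat)
    (st : Option Int × Option Int × Option Int × Option Int) {d : Int}
    (h : pvMatchD cs j = some d) :
    pvWordsB.foldl (pvInnerB cs (j : Int)) st = pvUpd st d (j : Int) := by
  unfold pvMatchD at h
  rcases Option.map_eq_some_iff.mp h with ⟨p, hfind, hd⟩
  obtain ⟨hpred, as, bs, heq, has⟩ := List.find?_eq_some_iff_append.mp hfind
  have hpB : p ∈ pvWordsB := List.mem_of_find?_eq_some hfind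
  have hbs : ∀ q ∈ bs, PySem.Chars.startswith (cs.drop j) q.1 = false := by
    intro q hq
    by_contra hqc
    have hq' : PySem.Chars.startswith (cs.drop j) q.1 = true := by
      simpa using hqc
    have h1 : q.1 <+: cs.drop j := (PySem.Chars.startswith_iff _ _).mp hq'
    have h2 : p.1 <+: cs.drop j := (PySem.Chars.startswith_iff _ _).mp hpred
    have hqB : q ∈ pvWordsB := by
      rw [heq]
      exact List.mem_append_right _ (List.mem_cons_of_mem _ hq)
    have huniq := pvOcc_unique (pv_words_ba q hqB) (pv_words_ba p hpB) h1 h2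
    have hqp : q = p := Prod.ext huniq.2 huniq.1
    have hnd : pvWordsB.Nodup := by decide
    rw [heq] at hnd
    have hpnbs : p ∉ bs := (List.nodup_cons.mp hnd.of_append_right).1
    exact hpnbs (hqp ▸ hq)
  rw [heq, List.foldl_append]
  rw [pvInnerB_no_match cs (j : Int) as st (by
    intro q hq
    have := has q hq
    simpa [Int.toNat_natCast] using this)]
  rw [List.foldl_cons]
  have hstep : pvInnerB cs (j : Int) st p = pvUpd st d (j : Int) := by
    subst hd
    by_cases h1 : st.1.isNone <;> simp [pvInnerB, pvUpd, Int.toNat_natCast, hpred, h1]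
  rw [hstep]
  apply pvInnerB_no_match
  intro q hq
  simpa [Int.toNat_natCast] using hbs q hq

theorem pvB_scan (cs : List Char) (k : Nat) :
    (List.range k).foldl
      (fun st j => pvWordsB.foldl (pvInnerB cs ((j : Nat) : Int)) st)
      (none, none, none, none) = pvOut (pvML cs k) := by
  induction k with
  | zero => rfl
  | succ k ih =>
    rw [List.range_succ, List.foldl_append, ih, List.foldl_cons, List.foldl_nil]
    have hML : pvML cs (k+1) =
        pvML cs k ++ ((pvMatchD cs k).map (fun d => (d, (k : Int)))).toList := by
      unfold pvML
      rw [List.range_succ, List.filterMap_append]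
      cases hx : pvMatchD cs k <;> simp [hx]
    cases hm : pvMatchD cs k with
    | none =>
      have hnone : pvWordsB.find? (fun p => PySem.Chars.startswith (cs.drop k) p.1) = none := by
        unfold pvMatchD at hm
        exact Option.map_eq_none_iff.mp hm
      have hall := List.find?_eq_none.mp hnone
      rw [pvInnerB_no_match cs ((k : Nat) : Int) pvWordsB _ (by
        intro p hp
        have := hall p hp
        simpa [Int.toNat_natCast] using this)]
      rw [hML, hm]
      simp
    | some d =>
      rw [pvInnerB_match cs k _ hm, hML, hm]
      cases hl : pvML cs k with
      | nil => simp [pvOut, pvUpd]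
      | cons a t =>
        have hg : (a :: (t ++ [(d, (k : Int))])).getLast? = some (d, (k : Int)) := by
          rw [← List.cons_append]
          exact List.getLast?_concat
        simp [pvOut, pvUpd, hg]

-- ---------- A characterization ----------

-- invariant of A's earliest accumulator after processing the words in P
def pvInvE (cs : List Char) (P : List (Int × List Char)) (e : Option Int × Option Int) : Prop :=
  (e = (none, none) ∧ ∀ p ∈ P, ∀ j : Nat, ¬ p.2 <+: cs.drop j) ∨
  (∃ (d : Int) (w : List Char) (i : Nat), (d, w) ∈ P ∧ e = (some d, some (i : Int)) ∧
    w <+: cs.drop i ∧ ∀ p ∈ P, ∀ j : Nat, p.2 <+: cs.drop j → i ≤ j)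

-- invariant of A's latest accumulator
def pvInvL (cs : List Char) (P : List (Int × List Char)) (e : Option Int × Option Int) : Prop :=
  (e = (none, none) ∧ ∀ p ∈ P, ∀ j : Nat, ¬ p.2 <+: cs.drop j) ∨
  (∃ (d : Int) (w : List Char) (i : Nat), (d, w) ∈ P ∧ e = (some d, some (i : Int)) ∧
    w <+: cs.drop i ∧ ∀ p ∈ P, ∀ j : Nat, p.2 <+: cs.drop j → j ≤ i)

theorem pv_no_occ_of_find_neg (cs : List Char) (w : List Char)
    (hf : PySem.Chars.find cs w = -1) : ∀ j : Nat, ¬ w <+: cs.drop j := by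
  intro j hj
  have hinf := (PySem.Chars.find_eq_neg_one_iff cs w).mp hf
  have : (∃ j : Nat, w <+: cs.drop j) := ⟨j, hj⟩
  rw [PySem.Chars.exists_prefix_drop_iff_isIn, PySem.Chars.isIn_iff_infix] at this
  exact hinf this

theorem pvStepA_invE (cs : List Char) (P : List (Int × List Char)) (a : Int × List Char)
    (st : Option Int × Option Int × Option Int × Option Int)
    (hE : pvInvE cs P (st.1, st.2.1)) :
    pvInvE cs (P ++ [a]) ((pvStepA cs st a).1, (pvStepA cs st a).2.1) := by
  by_cases hf : PySem.Chars.find cs a.2 = -1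
  · have hst1 : (pvStepA cs st a).1 = st.1 := by simp [pvStepA, hf]
    have hst2 : (pvStepA cs st a).2.1 = st.2.1 := by simp [pvStepA, hf]
    rw [hst1, hst2]
    have hno := pv_no_occ_of_find_neg cs a.2 hf
    rcases hE with ⟨h1, h2⟩ | ⟨d, w, i, hmem, hst, hpre, hmin⟩
    · left
      refine ⟨h1, ?_⟩
      intro p hp j
      rcases List.mem_append.mp hp with hp' | hp'
      · exact h2 p hp' j
      · rw [List.mem_singleton.mp hp']
        exact hno j
    · right
      refine ⟨d, w, i, List.mem_append_left _ hmem, hst, hpre, ?_⟩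
      intro p hp j hj
      rcases List.mem_append.mp hp with hp' | hp'
      · exact hmin p hp' j hj
      · exact absurd hj (by rw [List.mem_singleton.mp hp']; exact hno j)
  · have h0 : 0 ≤ PySem.Chars.find cs a.2 := by
      have := PySem.Chars.neg_one_le_find cs a.2
      omega
    have hc : ((PySem.Chars.find cs a.2).toNat : Int) = PySem.Chars.find cs a.2 :=
      Int.toNat_of_nonneg h0
    obtain ⟨hfp, hfmin⟩ := PySem.Chars.find_spec h0
    rcases hE with ⟨h1, h2⟩ | ⟨d, w, i, hmem, hst, hpre, hmin⟩
    · injection h1 with he1 he2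
      have hst1 : (pvStepA cs st a).1 = some a.1 := by simp [pvStepA, he1, hf]
      have hst2 : (pvStepA cs st a).2.1 = some (PySem.Chars.find cs a.2) := by
        simp [pvStepA, he1, hf]
      right
      refine ⟨a.1, a.2, (PySem.Chars.find cs a.2).toNat,
        List.mem_append_right _ (List.mem_singleton.mpr rfl), ?_, hfp, ?_⟩
      · rw [hst1, hst2, hc]
      · intro p hp j hj
        rcases List.mem_append.mp hp with hp' | hp'
        · exact absurd hj (h2 p hp' j)
        · rw [List.mem_singleton.mp hp'] at hj
          by_contra hlt
          exact hfmin j (by omega) hj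
    · injection hst with he1 he2
      by_cases hlt : PySem.Chars.find cs a.2 < ((i : Nat) : Int)
      · have hst1 : (pvStepA cs st a).1 = some a.1 := by simp [pvStepA, he1, he2, hf, hlt]
        have hst2 : (pvStepA cs st a).2.1 = some (PySem.Chars.find cs a.2) := by
          simp [pvStepA, he1, he2, hf, hlt]
        right
        refine ⟨a.1, a.2, (PySem.Chars.find cs a.2).toNat,
          List.mem_append_right _ (List.mem_singleton.mpr rfl), ?_, hfp, ?_⟩
        · rw [hst1, hst2, hc]
        · intro p hp j hj
          rcases List.mem_append.mp hp with hp' | hp'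
          · have := hmin p hp' j hj
            omega
          · rw [List.mem_singleton.mp hp'] at hj
            by_contra hlt'
            exact hfmin j (by omega) hj
      · have hst1 : (pvStepA cs st a).1 = st.1 := by simp [pvStepA, he1, he2, hf, hlt]
        have hst2 : (pvStepA cs st a).2.1 = st.2.1 := by simp [pvStepA, he1, he2, hf, hlt]
        right
        refine ⟨d, w, i, List.mem_append_left _ hmem, by rw [hst1, hst2, he1, he2], hpre, ?_⟩
        intro p hp j hj
        rcases List.mem_append.mp hp with hp' | hp'
        · exact hmin p hp' j hj
        · rw [List.mem_singleton.mp hp'] at hj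
          have hjf : ¬ j < (PySem.Chars.find cs a.2).toNat := fun hcon => hfmin j hcon hj
          omega

theorem pv_no_occ_of_rfind_neg (cs : List Char) (w : List Char) (hw : w ≠ [])
    (hr : PySem.Chars.rfind cs w = -1) : ∀ j : Nat, ¬ w <+: cs.drop j := by
  intro j hj
  rcases pvRfindGo_spec cs w cs.length with ⟨_, h2⟩ | ⟨m, _, he, _, _⟩
  · exact h2 j (le_of_lt (pvOcc_lt_length hw hj)) hj
  · rw [show PySem.Chars.rfind cs w = PySem.Chars.rfind.go cs w cs.length from rfl] at hr
    rw [he] at hr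
    omega

theorem pv_rfind_spec (cs : List Char) (w : List Char) (hw : w ≠ [])
    (hr : PySem.Chars.rfind cs w ≠ -1) :
    ∃ m : Nat, PySem.Chars.rfind cs w = (m : Int) ∧ w <+: cs.drop m ∧
      ∀ j : Nat, w <+: cs.drop j → j ≤ m := by
  rcases pvRfindGo_spec cs w cs.length with ⟨h1, _⟩ | ⟨m, _, he, hp, hmax⟩
  · exact absurd h1 hr
  · refine ⟨m, he, hp, ?_⟩
    intro j hj
    by_contra hlt
    exact hmax j (le_of_lt (pvOcc_lt_length hw hj)) (by omega) hj


theorem pvStepA_invL (cs : List Char) (P : List (Int × List Char)) (a : Int × List Char)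
    (ha : a.2 ≠ [])
    (st : Option Int × Option Int × Option Int × Option Int)
    (hL : pvInvL cs P (st.2.2.1, st.2.2.2)) :
    pvInvL cs (P ++ [a]) ((pvStepA cs st a).2.2.1, (pvStepA cs st a).2.2.2) := by
  by_cases hf : PySem.Chars.rfind cs a.2 = -1
  · have hst1 : (pvStepA cs st a).2.2.1 = st.2.2.1 := by simp [pvStepA, hf]
    have hst2 : (pvStepA cs st a).2.2.2 = st.2.2.2 := by simp [pvStepA, hf]
    rw [hst1, hst2]
    have hno := pv_no_occ_of_rfind_neg cs a.2 ha hf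
    rcases hL with ⟨h1, h2⟩ | ⟨d, w, i, hmem, hst, hpre, hmax⟩
    · left
      refine ⟨h1, ?_⟩
      intro p hp j
      rcases List.mem_append.mp hp with hp' | hp'
      · exact h2 p hp' j
      · rw [List.mem_singleton.mp hp']
        exact hno j
    · right
      refine ⟨d, w, i, List.mem_append_left _ hmem, hst, hpre, ?_⟩
      intro p hp j hj
      rcases List.mem_append.mp hp with hp' | hp'
      · exact hmax p hp' j hj
      · exact absurd hj (by rw [List.mem_singleton.mp hp']; exact hno j)
  · obtain ⟨m, hme, hmp, hmmax⟩ := pv_rfind_spec cs a.2 ha hf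
    rcases hL with ⟨h1, h2⟩ | ⟨d, w, i, hmem, hst, hpre, hmax⟩
    · injection h1 with he1 he2
      have hst1 : (pvStepA cs st a).2.2.1 = some a.1 := by simp [pvStepA, he1, hf]
      have hst2 : (pvStepA cs st a).2.2.2 = some (PySem.Chars.rfind cs a.2) := by
        simp [pvStepA, he1, hf]
      right
      refine ⟨a.1, a.2, m, List.mem_append_right _ (List.mem_singleton.mpr rfl),
        by rw [hst1, hst2, hme], hmp, ?_⟩
      intro p hp j hj
      rcases List.mem_append.mp hp with hp' | hp'
      · exact absurd hj (h2 p hp' j)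
      · rw [List.mem_singleton.mp hp'] at hj
        exact hmmax j hj
    · injection hst with he1 he2
      by_cases hlt : PySem.Chars.rfind cs a.2 > ((i : Nat) : Int)
      · have hst1 : (pvStepA cs st a).2.2.1 = some a.1 := by
          simp [pvStepA, he1, he2, hf, hlt]
        have hst2 : (pvStepA cs st a).2.2.2 = some (PySem.Chars.rfind cs a.2) := by
          simp [pvStepA, he1, he2, hf, hlt]
        right
        refine ⟨a.1, a.2, m, List.mem_append_right _ (List.mem_singleton.mpr rfl),
          by rw [hst1, hst2, hme], hmp, ?_⟩
        intro p hp j hj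
        rcases List.mem_append.mp hp with hp' | hp'
        · have := hmax p hp' j hj
          rw [hme] at hlt
          omega
        · rw [List.mem_singleton.mp hp'] at hj
          exact hmmax j hj
      · have hst1 : (pvStepA cs st a).2.2.1 = st.2.2.1 := by
          simp [pvStepA, he1, he2, hf, hlt]
        have hst2 : (pvStepA cs st a).2.2.2 = st.2.2.2 := by
          simp [pvStepA, he1, he2, hf, hlt]
        right
        refine ⟨d, w, i, List.mem_append_left _ hmem, by rw [hst1, hst2, he1, he2], hpre, ?_⟩
        intro p hp j hj
        rcases List.mem_append.mp hp with hp' | hp'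
        · exact hmax p hp' j hj
        · rw [List.mem_singleton.mp hp'] at hj
          have := hmmax j hj
          rw [hme] at hlt
          omega

theorem pvA_fold (cs : List Char) (L : List (Int × List Char)) :
    ∀ (P : List (Int × List Char)) (st : Option Int × Option Int × Option Int × Option Int),
    (∀ p ∈ L, p ∈ pvWordsA) →
    pvInvE cs P (st.1, st.2.1) → pvInvL cs P (st.2.2.1, st.2.2.2) →
    pvInvE cs (P ++ L) ((L.foldl (pvStepA cs) st).1, (L.foldl (pvStepA cs) st).2.1) ∧
    pvInvL cs (P ++ L) ((L.foldl (pvStepA cs) st).2.2.1, (L.foldl (pvStepA cs) st).2.2.2) := by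
  induction L with
  | nil =>
    intro P st _ hE hL
    simpa using ⟨hE, hL⟩
  | cons a t ih =>
    intro P st hsub hE hL
    rw [List.foldl_cons]
    have hE' := pvStepA_invE cs P a st hE
    have hL' := pvStepA_invL cs P a
      (pv_words_nonempty a (hsub a List.mem_cons_self)) st hL
    have := ih (P ++ [a]) (pvStepA cs st a)
      (fun p hp => hsub p (List.mem_cons_of_mem _ hp)) hE' hL'
    simpa [List.append_assoc] using this

theorem pvA_char (cs : List Char) :
    pvWordsA.foldl (pvStepA cs) (none, none, none, none) = pvOut (pvML cs cs.length) := by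
  obtain ⟨hE, hL⟩ := pvA_fold cs pvWordsA [] (none, none, none, none)
    (fun p hp => hp) (Or.inl ⟨rfl, by simp⟩) (Or.inl ⟨rfl, by simp⟩)
  rw [List.nil_append] at hE hL
  rcases hE with ⟨h1, h2⟩ | ⟨d, w, i, hmem, hst, hpre, hmin⟩
  · have hML : pvML cs cs.length = [] := by
      apply List.filterMap_eq_nil_iff.mpr
      intro j _
      rw [Option.map_eq_none_iff, pvMatchD_eq_none_iff]
      rintro d ⟨w, hmw, hpw⟩
      exact h2 (d, w) hmw j hpw
    rcases hL with ⟨g1, g2⟩ | ⟨d, w, i, hmemL, hstL, hpreL, _⟩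
    · injection h1 with h1a h1b
      injection g1 with g1a g1b
      rw [hML]
      rw [show pvWordsA.foldl (pvStepA cs) (none, none, none, none) =
        ((pvWordsA.foldl (pvStepA cs) (none, none, none, none)).1,
         (pvWordsA.foldl (pvStepA cs) (none, none, none, none)).2.1,
         (pvWordsA.foldl (pvStepA cs) (none, none, none, none)).2.2.1,
         (pvWordsA.foldl (pvStepA cs) (none, none, none, none)).2.2.2) from rfl,
        h1a, h1b, g1a, g1b]
      rfl
    · exact absurd hpreL (h2 (d, w) hmemL i)
  · rcases hL with ⟨g1, g2⟩ | ⟨d', w', i', hmemL, hstL, hpreL, hmaxL⟩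
    · exact absurd hpre (g2 (d, w) hmem i)
    · have hiL : i < cs.length := pvOcc_lt_length (pv_words_nonempty (d, w) hmem) hpre
      have hiL' : i' < cs.length := pvOcc_lt_length (pv_words_nonempty (d', w') hmemL) hpreL
      have hmd : pvMatchD cs i = some d := pvMatchD_eq_some_iff.mpr ⟨w, hmem, hpre⟩
      have hmd' : pvMatchD cs i' = some d' := pvMatchD_eq_some_iff.mpr ⟨w', hmemL, hpreL⟩
      have hmemML : ((d, (i : Int)) : Int × Int) ∈ pvML cs cs.length :=
        mem_pvML.mpr ⟨i, hiL, rfl, hmd⟩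
      have hmemML' : ((d', (i' : Int)) : Int × Int) ∈ pvML cs cs.length :=
        mem_pvML.mpr ⟨i', hiL', rfl, hmd'⟩
      have hhead : (pvML cs cs.length).head? = some (d, (i : Int)) := by
        apply pv_head?_eq (pvML_pairwise cs cs.length) hmemML
        intro y hy
        rcases mem_pvML.mp hy with ⟨j, _, hy2, hymd⟩
        rcases pvMatchD_eq_some_iff.mp hymd with ⟨wy, hwy, hpy⟩
        have := hmin (y.1, wy) hwy j hpy
        rw [hy2]
        show (i : Int) ≤ (j : Int)
        exact_mod_cast this
      have hglast : (pvML cs cs.length).getLast? = some (d', (i' : Int)) := by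
        apply pv_getLast?_eq (pvML_pairwise cs cs.length) hmemML'
        intro y hy
        rcases mem_pvML.mp hy with ⟨j, _, hy2, hymd⟩
        rcases pvMatchD_eq_some_iff.mp hymd with ⟨wy, hwy, hpy⟩
        have := hmaxL (y.1, wy) hwy j hpy
        rw [hy2]
        show (j : Int) ≤ (i' : Int)
        exact_mod_cast this
      injection hst with ha1 ha2
      injection hstL with hb1 hb2
      rw [show pvWordsA.foldl (pvStepA cs) (none, none, none, none) =
        ((pvWordsA.foldl (pvStepA cs) (none, none, none, none)).1,
         (pvWordsA.foldl (pvStepA cs) (none, none, none, none)).2.1,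
         (pvWordsA.foldl (pvStepA cs) (none, none, none, none)).2.2.1,
         (pvWordsA.foldl (pvStepA cs) (none, none, none, none)).2.2.2) from rfl,
        ha1, ha2, hb1, hb2]
      simp [pvOut, hhead, hglast]

-- ===== VERDICT (by name: the statement is the Claim_ definition above) =====
theorem get_text_match_spec : Claim_equal_get_text_match := by
  intro line _
  unfold Spec_get_text_match get_text_match get_text_match_alt
  rw [PySem.Str.len_eq, PySem.List.pyRange_zero_nat, List.foldl_map]
  rw [pvA_char, pvB_scan]
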